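-- pv_equiv track=rewrite | github.com/bbuchanan208/BMAC_Algorithm | preProcessing.py | helper
-- ===== SOURCE A (Python) =====
-- def helper(a,b, pattern):
--     m = len(pattern)
--     listy = []
--     if pattern[m-1] == a:
--         listy.append(1)
--     for i in range(m + 1):
--         try:
--             if pattern[i] == a and pattern[i + 1] == b:
--                 listy.append(m-i)
--         except:
--             pass
--     if pattern[0] == b:
--         listy.append(m + 1)
--     else:
--         listy.append(m+2)
--     return min(listy)
-- ===== SOURCE B (Python) =====
-- def helper(a, b, pattern):
--     m = len(pattern)
--     if pattern[m - 1] == a: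
--         return 1
--     for i in range(m - 2, -1, -1):
--         if pattern[i] == a and pattern[i + 1] == b:
--             return m - i
--     return m + 1 if pattern[0] == b else m + 2
-- ===== Notes on version B (the rewrite author's own statement) =====
-- stated objective: simpler
-- what changed: B replaces A's build-a-candidate-list-then-min (with try/except guards) by minimality reasoning with early returns: return 1 immediately if the last character equals a, otherwise scan indices downward and return at the first matching pair (which is provably the minimum), else the fallback.
import Mathlib
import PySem

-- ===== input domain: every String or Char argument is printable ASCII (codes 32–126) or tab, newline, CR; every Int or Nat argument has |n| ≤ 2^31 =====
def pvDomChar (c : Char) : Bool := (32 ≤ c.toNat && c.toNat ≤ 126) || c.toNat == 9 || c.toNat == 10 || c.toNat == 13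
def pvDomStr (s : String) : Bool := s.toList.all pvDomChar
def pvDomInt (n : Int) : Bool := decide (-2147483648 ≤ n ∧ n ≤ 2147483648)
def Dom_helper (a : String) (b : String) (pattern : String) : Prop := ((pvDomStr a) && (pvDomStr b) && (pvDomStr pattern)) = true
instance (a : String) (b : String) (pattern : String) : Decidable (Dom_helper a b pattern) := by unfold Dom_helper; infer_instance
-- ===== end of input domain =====

-- B replaces A's candidate-list-then-min by early returns justified by minimality; equivalence is about the return value (neither mutates).

-- Python's `pattern[i] == a`: the 1-character string pattern[i] equals the string a
-- (string equality = code-point list equality; exact).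
def pvChEq (c : Char) (s : String) : Bool := [c] == s.toList

-- the loop body's test `pattern[i] == a and pattern[i+1] == b`; the try/except of A
-- (and the in-range bound of B's loop) make an out-of-range access simply not match,
-- which is the `false` branches here.
def pvPairAt (a : String) (b : String) (pattern : String) (i : Int) : Bool :=
  match PySem.Str.pyGet? pattern i, PySem.Str.pyGet? pattern (i + 1) with
  | some c1, some c2 => pvChEq c1 a && pvChEq c2 b
  | _, _ => false

-- ===== PORT A =====
def helper (a : String) (b : String) (pattern : String) : Int :=
  let m : Int := PySem.Str.len pattern
  match PySem.Str.pyGet? pattern (m - 1) with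
  | none => 0   -- pattern[m-1] raises IndexError (empty pattern); excluded by Pre_helper
  | some clast =>
    let listy : List Int := if pvChEq clast a then [1] else []
    let listy := (PySem.List.pyRange 0 (m + 1) 1).foldl
      (fun acc i => if pvPairAt a b pattern i then acc ++ [m - i] else acc) listy
    let listy := listy ++
      [if (match PySem.Str.pyGet? pattern 0 with
           | some c0 => pvChEq c0 b | none => false) then m + 1 else m + 2]
    (PySem.List.min? listy (fun x => x)).getD 0

-- ===== PORT B =====
-- B's `for i in range(m-2, -1, -1): if …: return m-i` as structural recursion;
-- pvScanDown a b pattern m k scans i = k-1, k-2, …, 0 and returns at the first match.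
def pvScanDown (a : String) (b : String) (pattern : String) (m : Int) : Nat → Option Int
  | 0 => none
  | j + 1 => if pvPairAt a b pattern (j : Int) then some (m - (j : Int))
             else pvScanDown a b pattern m j

def helper_alt (a : String) (b : String) (pattern : String) : Int :=
  let m : Int := PySem.Str.len pattern
  match PySem.Str.pyGet? pattern (m - 1) with
  | none => 0   -- pattern[m-1] raises IndexError (empty pattern); excluded by Pre_helper
  | some clast =>
    if pvChEq clast a then 1
    else
      match pvScanDown a b pattern m (m - 1).toNat with
      | some v => v
      | none =>
        if (match PySem.Str.pyGet? pattern 0 with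
            | some c0 => pvChEq c0 b | none => false) then m + 1 else m + 2

-- ===== PRECONDITION & SPEC =====
-- Pre_ excludes only the empty pattern, on which A raises IndexError at pattern[m-1].
def Pre_helper (a : String) (b : String) (pattern : String) : Prop := pattern ≠ ""
instance (a : String) (b : String) (pattern : String) : Decidable (Pre_helper a b pattern) := by
  unfold Pre_helper; infer_instance

def pvWitness_helper : String × String × String := ("a", "b", "ab")

def Spec_helper (a : String) (b : String) (pattern : String) (out : Int) : Prop := out = helper_alt a b pattern
instance (a : String) (b : String) (pattern : String) (out : Int) : Decidable (Spec_helper a b pattern out) := by unfold Spec_helper; infer_instance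

-- ===== CLAIM (what is proved, stated in full; the proofs are below) =====
def Claim_equal_helper : Prop := ∀ (a : String) (b : String) (pattern : String), Dom_helper a b pattern → Pre_helper a b pattern → Spec_helper a b pattern (helper a b pattern)

-- ===== LEMMAS AND PROOFS =====

-- a true pair test at a nonnegative index needs pattern[i+1] to exist
theorem pvPairAt_bound (a b pattern : String) (i : Int)
    (h : pvPairAt a b pattern i = true) : i + 1 < (pattern.toList.length : Int) := by
  by_contra hge
  have hnone : PySem.List.pyGet? pattern.toList (i + 1) = none := by
    rw [PySem.List.pyGet?_eq_none_iff]
    unfold PySem.Raise.InRange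
    omega
  unfold pvPairAt at h
  simp only [PySem.Str.pyGet?_eq, PySem.Chars.pyGet?_eq_listPyGet?] at h
  rw [hnone] at h
  rcases hx : PySem.List.pyGet? pattern.toList i with _ | c <;> rw [hx] at h <;> simp at h

-- A's range(m+1) filtered by the pair test equals range(m-1) filtered: indices m-1, m never match
theorem pv_filter_high (a b pattern : String) (m : Int)
    (hmeq : m = (pattern.toList.length : Int)) (hm : 1 ≤ m) :
    (PySem.List.pyRange 0 (m + 1)).filter (pvPairAt a b pattern)
      = (PySem.List.pyRange 0 (m - 1)).filter (pvPairAt a b pattern) := by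
  rw [PySem.List.pyRange_one_append 0 (m - 1) (m + 1) (by omega) (by omega), List.filter_append]
  have h2 : (PySem.List.pyRange (m - 1) (m + 1)).filter (pvPairAt a b pattern) = [] := by
    rw [List.filter_eq_nil_iff]
    intro x hx hpx
    rw [PySem.List.mem_pyRange_one] at hx
    have := pvPairAt_bound a b pattern x hpx
    omega
  rw [h2, List.append_nil]

-- the descending scan returns (last match of the ascending filtered range) mapped through m - ·
theorem pvScanDown_eq (a b pattern : String) (m : Int) (k : Nat) :
    pvScanDown a b pattern m k
      = (((PySem.List.pyRange 0 (k : Int)).filter (pvPairAt a b pattern)).getLast?).map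
          (fun i => m - i) := by
  induction k with
  | zero => simp [pvScanDown, PySem.List.pyRange_one_eq_nil (le_refl (0 : Int))]
  | succ j ih =>
    have hr : PySem.List.pyRange 0 ((j + 1 : Nat) : Int)
        = PySem.List.pyRange 0 (j : Int) ++ [(j : Int)] := by
      push_cast
      exact PySem.List.pyRange_one_succ_right (by positivity)
    rw [pvScanDown, hr, List.filter_append]
    rcases hp : pvPairAt a b pattern (j : Int) with _ | _
    · simp [hp, ih]
    · simp [hp]

-- in a <-pairwise list the last element bounds every element
theorem pv_pairwise_le_last (l : List Int) (x : Int) (hp : l.Pairwise (· < ·))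
    (hl : l.getLast? = some x) : ∀ y ∈ l, y ≤ x := by
  induction l with
  | nil => simp at hl
  | cons a t ih =>
    rcases t with _ | ⟨b, t'⟩
    · simp at hl; subst hl; simp
    · rw [List.getLast?_cons_cons] at hl
      have hp' := (List.pairwise_cons.mp hp).2
      intro y hy
      rcases List.mem_cons.mp hy with rfl | hyt
      · have hx : x ∈ b :: t' := List.mem_of_getLast? hl
        have := (List.pairwise_cons.mp hp).1 x hx
        omega
      · exact ih hp' hl y hyt

-- Python's min returns the value of any member that bounds the whole list from below
theorem pv_min_eq (l : List Int) (x : Int) (hx : x ∈ l) (hlb : ∀ y ∈ l, x ≤ y) :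
    PySem.List.min? l (fun y => y) = some x := by
  rcases h : PySem.List.min? l (fun y => y) with _ | mv
  · rw [PySem.List.min?_eq_none_iff] at h
    subst h; simp at hx
  · have h1 : mv ≤ x := PySem.List.min?_isMin h x hx
    have h2 : x ≤ mv := hlb mv (PySem.List.min?_mem h)
    have : mv = x := le_antisymm h1 h2
    rw [this]

-- ===== VERDICT (by name: the statement is the Claim_ definition above) =====
theorem helper_spec : Claim_equal_helper := by
  intro a b pattern _ hpre
  unfold Spec_helper helper helper_alt
  have hL : pattern.toList ≠ [] := by simpa using hpre
  have hm : 1 ≤ (pattern.toList.length : Int) := by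
    have := List.length_pos_iff.mpr hL; omega
  -- the last-character access succeeds
  have hlast : PySem.Str.pyGet? pattern ((pattern.toList.length : Int) - 1)
      = some (pattern.toList.getLast hL) := by
    rw [PySem.Str.pyGet?_eq, PySem.Chars.pyGet?_eq_listPyGet?,
        PySem.List.pyGet?_of_nonneg _ (by omega)]
    have ht : ((pattern.toList.length : Int) - 1).toNat = pattern.toList.length - 1 := by omega
    rw [ht, List.getElem?_eq_getElem (by omega)]
    congr 1
    exact (List.getLast_eq_getElem hL).symm
  simp only [PySem.Str.len_eq, hlast]
  set m : Int := (pattern.toList.length : Int) with hmdef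
  clear_value m
  set p : Int → Bool := pvPairAt a b pattern with hpdef
  set fb : Int := (if (match PySem.Str.pyGet? pattern 0 with
      | some c0 => pvChEq c0 b | none => false) then m + 1 else m + 2) with hfb
  clear_value fb
  have hfb_lb : m + 1 ≤ fb := by rw [hfb]; split_ifs <;> norm_num
  rw [PySem.List.foldl_append_if p (fun i => m - i)]
  have hbnd : ∀ y ∈ ((PySem.List.pyRange 0 (m + 1)).filter p).map (fun i => m - i),
      2 ≤ y ∧ m - ((PySem.List.pyRange 0 (m + 1)).filter p).getLast?.getD 0 ≤ y := by
    intro y hy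
    rcases List.mem_map.mp hy with ⟨i, hi, rfl⟩
    have hir := (List.mem_filter.mp hi).1
    have hip := (List.mem_filter.mp hi).2
    rw [PySem.List.mem_pyRange_one] at hir
    have h1 : i + 1 < m := by
      rw [hmdef]; exact pvPairAt_bound a b pattern i hip
    constructor
    · omega
    · rcases hg : ((PySem.List.pyRange 0 (m + 1)).filter p).getLast? with _ | iM
      · rw [List.getLast?_eq_none_iff] at hg; rw [hg] at hi; simp at hi
      · have hle := pv_pairwise_le_last _ iM
          ((PySem.List.pairwise_lt_pyRange_one 0 (m + 1)).filter p) hg i hi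
        simp only [Option.getD_some]
        omega
  rcases hca : pvChEq (pattern.toList.getLast hL) a with _ | _
  · -- last character does not match a: B scans downward
    simp only [Bool.false_eq_true, if_false, List.nil_append]
    rw [pvScanDown_eq]
    have hcast : (((m - 1).toNat : Int)) = m - 1 := by omega
    rw [hcast, ← pv_filter_high a b pattern m hmdef hm]
    rcases hg : ((PySem.List.pyRange 0 (m + 1)).filter p).getLast? with _ | iM
    · -- no matching pair: minimum is the fallback
      rw [List.getLast?_eq_none_iff] at hg
      rw [hg]
      simp only [List.map_nil, List.nil_append, Option.map_none]
      rw [PySem.List.min?_id_cons]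
      simp
    · -- a matching pair exists: minimum is m - (largest matching index)
      have hiM := List.mem_of_getLast? hg
      have hirange := (List.mem_filter.mp hiM).1
      rw [PySem.List.mem_pyRange_one] at hirange
      rw [pv_min_eq _ (m - iM) ?_ ?_]
      · simp
      · exact List.mem_append_left _ (List.mem_map.mpr ⟨iM, hiM, rfl⟩)
      · intro y hy
        rcases List.mem_append.mp hy with hy' | hy'
        · have := (hbnd y hy').2
          rw [hg] at this
          simpa using this
        · simp only [List.mem_singleton] at hy'
          omega
  · -- last character matches a: the answer is 1
    simp only [if_true, List.cons_append, List.nil_append]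
    rw [pv_min_eq _ 1 (List.mem_cons_self) ?_]
    · simp
    · intro y hy
      rcases List.mem_cons.mp hy with rfl | hy'
      · omega
      · rcases List.mem_append.mp hy' with hy2 | hy2
        · have := (hbnd y hy2).1; omega
        · simp only [List.mem_singleton] at hy2; omega
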